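-- pv_equiv track=rewrite | github.com/maciekzielonka1/cpsc490_code | src/speaker_diarization.py | create_labellings_with_pydub
-- ===== SOURCE A (Python) =====
-- def create_labellings_with_pydub(y, segments, labels, silence_first):
--     """
--     Creates diarization labels, accounting for the fact that the silent segments have already been determined
--     y - a waveform array
--     segments - a list of tuples, describing the start_frame and end_frame of each segment to be labelled
--     labels - the spectral labels assigned to the two speakers
--     silence_first - whether the first segment was determined to be silent. This determines whether the first label is "Silence", or "Speaker"
--     returns:
--     labelling - A list in the form of[(`speaker_id`, `segment_start_frame`, `segment_end_frame`, `speaker_label`)...]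
--     """
--     adult_set = False
--     adult_label = labels[0]
--     label_idx = 0
--     labelling = []
--     for i, segment in enumerate(segments):
--         start = segment[0]
--         end = segment[1]
--         if silence_first:
--             if i % 2 == 0:
--                 labelling.append(('2', start, end, "Silence"))
--             else:
--                 label = labels[label_idx]
--                 if label == adult_label:
--                     speaker = "Adult"
--                 else:
--                     speaker = "Child"
--                 labelling.append((label, start, end, speaker))
--                 label_idx += 1
--         else:
--             if i % 2 == 1:
--                 labelling.append(('2', start, end, "Silence"))
--             else:
--                 label = labels[label_idx]
--                 if label == adult_label:
--                     speaker = "Adult"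
--                 else:
--                     speaker = "Child"
--                 labelling.append((label, start, end, speaker))
--                 label_idx += 1
--     return labelling
-- ===== SOURCE B (Python) =====
-- def _split_alternating(xs):
--     """Deinterleave: elements at even positions, elements at odd positions."""
--     firsts, seconds = [], []
--     take_first = True
--     for x in xs:
--         if take_first:
--             firsts.append(x)
--         else:
--             seconds.append(x)
--         take_first = not take_first
--     return firsts, seconds
--
--
-- def _riffle(xs, ys):
--     """Merge two lists alternately (xs first); leftovers appended at the end."""
--     out = []
--     i = 0
--     while i < len(xs) and i < len(ys):
--         out.append(xs[i])
--         out.append(ys[i])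
--         i += 1
--     out.extend(xs[i:])
--     out.extend(ys[i:])
--     return out
--
--
-- def create_labellings_with_pydub(y, segments, labels, silence_first):
--     adult_label = labels[0]
--     evens, odds = _split_alternating(segments)
--     sil_segs, spk_segs = (evens, odds) if silence_first else (odds, evens)
--     silence_rows = [('2', start, end, "Silence") for (start, end) in sil_segs]
--     speaker_rows = [(lab, start, end, "Adult" if lab == adult_label else "Child")
--                     for lab, (start, end) in zip(labels, spk_segs)]
--     if silence_first:
--         return _riffle(silence_rows, speaker_rows)
--     return _riffle(speaker_rows, silence_rows)
-- ===== Notes on version B (the rewrite author's own statement) =====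
-- stated objective: alternative
-- what changed: Replaces A's single stateful pass (per-index parity test, label_idx accumulator, dead adult_set flag, duplicated silence_first branches) with a staged pipeline: deinterleave the segments into two streams, build the silence rows and the speaker rows independently (speaker rows by zipping with labels, which removes the counter), then riffle-merge the two row lists.
import Mathlib
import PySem

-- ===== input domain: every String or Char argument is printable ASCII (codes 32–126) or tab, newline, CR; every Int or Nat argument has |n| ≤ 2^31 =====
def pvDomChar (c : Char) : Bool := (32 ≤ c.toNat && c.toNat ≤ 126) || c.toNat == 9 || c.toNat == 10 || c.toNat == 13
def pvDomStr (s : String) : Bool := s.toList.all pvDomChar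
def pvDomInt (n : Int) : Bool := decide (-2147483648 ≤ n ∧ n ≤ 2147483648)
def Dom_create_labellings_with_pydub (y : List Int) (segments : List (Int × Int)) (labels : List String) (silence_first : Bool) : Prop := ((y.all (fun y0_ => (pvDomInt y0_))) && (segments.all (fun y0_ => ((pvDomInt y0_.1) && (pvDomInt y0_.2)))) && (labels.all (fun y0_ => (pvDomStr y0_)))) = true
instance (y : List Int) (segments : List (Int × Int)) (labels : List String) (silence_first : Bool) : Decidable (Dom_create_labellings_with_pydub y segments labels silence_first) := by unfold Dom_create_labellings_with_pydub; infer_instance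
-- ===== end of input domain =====

-- B replaces A's single stateful pass with a staged pipeline: deinterleave the segments into two
-- streams, build silence rows and speaker rows independently (zip with labels), riffle-merge them
-- (objective: alternative, same cost).

-- ===== PORT A =====
-- A-side helper: the loop body of A (state = (label_idx, labelling), element = (i, (start, end)))
def pvStepA (labels : List String) (adult_label : String) (silence_first : Bool)
    (st : Int × List (String × Int × Int × String)) (p : Int × Int × Int) :
    Int × List (String × Int × Int × String) :=
  let i := p.1
  let start := p.2.1
  let stop := p.2.2
  if silence_first then
    if PySem.Int.mod i 2 == 0 then (st.1, st.2 ++ [("2", start, stop, "Silence")])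
    else
      let label := PySem.List.pyGetD labels st.1 ""
      let speaker := if label == adult_label then "Adult" else "Child"
      (st.1 + 1, st.2 ++ [(label, start, stop, speaker)])
  else
    if PySem.Int.mod i 2 == 1 then (st.1, st.2 ++ [("2", start, stop, "Silence")])
    else
      let label := PySem.List.pyGetD labels st.1 ""
      let speaker := if label == adult_label then "Adult" else "Child"
      (st.1 + 1, st.2 ++ [(label, start, stop, speaker)])

def create_labellings_with_pydub (y : List Int) (segments : List (Int × Int)) (labels : List String) (silence_first : Bool) : List (String × Int × Int × String) :=
  let adult_label := PySem.List.pyGetD labels 0 ""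
  ((PySem.List.enumerate segments 0).foldl (pvStepA labels adult_label silence_first) (0, [])).2

-- ===== PORT B =====
-- B-side helper: one step of Source B's _split_alternating loop (state = (firsts, seconds, take_first))
def pvSplitStep (st : List (Int × Int) × List (Int × Int) × Bool) (x : Int × Int) :
    List (Int × Int) × List (Int × Int) × Bool :=
  if st.2.2 then (st.1 ++ [x], st.2.1, false) else (st.1, st.2.1 ++ [x], true)

-- Source B's _split_alternating: deinterleave into (even positions, odd positions)
def pvSplitAlternating (xs : List (Int × Int)) : List (Int × Int) × List (Int × Int) × Bool :=
  xs.foldl pvSplitStep ([], [], true)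

-- Source B's _riffle: alternate pairwise while both lists last, then the leftovers (xs's, then ys's)
def pvRiffle {α : Type} : List α → List α → List α
  | x :: xs, y :: ys => x :: y :: pvRiffle xs ys
  | [], ys => ys
  | xs, [] => xs

def create_labellings_with_pydub_alt (y : List Int) (segments : List (Int × Int)) (labels : List String) (silence_first : Bool) : List (String × Int × Int × String) :=
  let adult_label := PySem.List.pyGetD labels 0 ""
  let sp := pvSplitAlternating segments
  let sil_segs := if silence_first then sp.1 else sp.2.1
  let spk_segs := if silence_first then sp.2.1 else sp.1
  let silence_rows := sil_segs.map (fun p => ("2", p.1, p.2, "Silence"))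
  let speaker_rows := (labels.zip spk_segs).map (fun q =>
      (q.1, q.2.1, q.2.2, if q.1 == adult_label then "Adult" else "Child"))
  if silence_first then pvRiffle silence_rows speaker_rows
  else pvRiffle speaker_rows silence_rows

-- ===== PRECONDITION & SPEC =====
-- Pre_ excludes exactly the inputs on which Python A raises IndexError: labels = [] (labels[0]),
-- or more speaker segments than labels (labels[label_idx] out of range).
def Pre_create_labellings_with_pydub (y : List Int) (segments : List (Int × Int)) (labels : List String) (silence_first : Bool) : Prop :=
  labels ≠ [] ∧ (if silence_first then segments.length / 2 else (segments.length + 1) / 2) ≤ labels.length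
instance (y : List Int) (segments : List (Int × Int)) (labels : List String) (silence_first : Bool) : Decidable (Pre_create_labellings_with_pydub y segments labels silence_first) := by unfold Pre_create_labellings_with_pydub; infer_instance

def pvWitness_create_labellings_with_pydub : List Int × (List (Int × Int)) × List String × Bool :=
  ([], [(0, 5), (5, 9), (9, 12)], ["0", "1"], true)

def Spec_create_labellings_with_pydub (y : List Int) (segments : List (Int × Int)) (labels : List String) (silence_first : Bool) (out : List (String × Int × Int × String)) : Prop := out = create_labellings_with_pydub_alt y segments labels silence_first
instance (y : List Int) (segments : List (Int × Int)) (labels : List String) (silence_first : Bool) (out : List (String × Int × Int × String)) : Decidable (Spec_create_labellings_with_pydub y segments labels silence_first out) := by unfold Spec_create_labellings_with_pydub; infer_instance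

-- ===== CLAIM (what is proved, stated in full; the proofs are below) =====
def Claim_equal_create_labellings_with_pydub : Prop := ∀ (y : List Int) (segments : List (Int × Int)) (labels : List String) (silence_first : Bool), Dom_create_labellings_with_pydub y segments labels silence_first → Pre_create_labellings_with_pydub y segments labels silence_first → Spec_create_labellings_with_pydub y segments labels silence_first (create_labellings_with_pydub y segments labels silence_first)

-- ===== LEMMAS AND PROOFS =====

-- common reference point for both ports: one row
def pvSil (p : Int × Int) : String × Int × Int × String := ("2", p.1, p.2, "Silence")
def pvSpk (adult lab : String) (p : Int × Int) : String × Int × Int × String :=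
  (lab, p.1, p.2, if lab == adult then "Adult" else "Child")

-- elements at even / odd positions
def pvEvens {α : Type} : List α → List α
  | [] => []
  | [x] => [x]
  | x :: _ :: t => x :: pvEvens t

def pvOdds {α : Type} (xs : List α) : List α := pvEvens xs.tail

lemma pvEvens_cons {α : Type} (x : α) (t : List α) : pvEvens (x :: t) = x :: pvOdds t := by
  cases t <;> rfl

-- the reference walk both ports are reduced to
def pvWalk (adult : String) : Bool → List String → List (Int × Int) → List (String × Int × Int × String)
  | _, _, [] => []
  | true, labs, s :: t => pvSil s :: pvWalk adult false labs t
  | false, labs, s :: t =>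
      pvSpk adult (PySem.List.pyGetD labs 0 "") s :: pvWalk adult true (labs.drop 1) t

lemma pvSplit_fold : ∀ (xs : List (Int × Int)) (ev od : List (Int × Int)),
    xs.foldl pvSplitStep (ev, od, true) = (ev ++ pvEvens xs, od ++ pvOdds xs, (xs.length % 2 == 0))
    ∧ xs.foldl pvSplitStep (ev, od, false) = (ev ++ pvOdds xs, od ++ pvEvens xs, (xs.length % 2 == 1)) := by
  intro xs
  induction xs with
  | nil => intro ev od; simp [pvEvens, pvOdds]
  | cons x t ih =>
    intro ev od
    constructor
    · have h1 : pvSplitStep (ev, od, true) x = (ev ++ [x], od, false) := by simp [pvSplitStep]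
      rw [List.foldl_cons, h1, (ih (ev ++ [x]) od).2]
      rw [pvEvens_cons]
      have : pvOdds (x :: t) = pvEvens t := rfl
      rw [this]
      have hm : ((x :: t).length % 2 == 0) = (t.length % 2 == 1) := by
        rw [Bool.eq_iff_iff]; simp only [beq_iff_eq, List.length_cons]; omega
      rw [hm]; simp
    · have h1 : pvSplitStep (ev, od, false) x = (ev, od ++ [x], true) := by simp [pvSplitStep]
      rw [List.foldl_cons, h1, (ih ev (od ++ [x])).1]
      rw [pvEvens_cons]
      have : pvOdds (x :: t) = pvEvens t := rfl
      rw [this]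
      have hm : ((x :: t).length % 2 == 1) = (t.length % 2 == 0) := by
        rw [Bool.eq_iff_iff]; simp only [beq_iff_eq, List.length_cons]; omega
      rw [hm]; simp

lemma pvLen_evens_odds {α : Type} : ∀ (xs : List α),
    (pvEvens xs).length = (xs.length + 1) / 2 ∧ (pvOdds xs).length = xs.length / 2 := by
  intro xs
  induction xs with
  | nil => simp [pvEvens, pvOdds]
  | cons x t ih =>
    constructor
    · rw [pvEvens_cons]
      simp only [List.length_cons, ih.2]
      omega
    · show (pvEvens t).length = (x :: t).length / 2
      simp only [List.length_cons, ih.1]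

-- the A-side loop computes pvWalk (c = label_idx, n = current enumerate index)
lemma pvA_loop (labels : List String) (adult : String) (sf : Bool) :
    ∀ (segs : List (Int × Int)) (n c : Nat) (acc : List (String × Int × Int × String)),
    ((PySem.List.enumerate segs ((n : Nat) : Int)).foldl (pvStepA labels adult sf) (((c : Nat) : Int), acc)).2
      = acc ++ pvWalk adult (decide (n % 2 = (if sf then 0 else 1))) (labels.drop c) segs := by
  intro segs
  induction segs with
  | nil => intro n c acc; simp [PySem.List.enumerate_nil, pvWalk]
  | cons hd tl ih =>
    intro n c acc
    rw [PySem.List.enumerate_cons, List.foldl_cons]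
    have hmod : PySem.Int.mod ((n : Nat) : Int) 2 = ((n % 2 : Nat) : Int) := PySem.Int.mod_natCast n 2
    have hcast : ((n : Nat) : Int) + 1 = (((n + 1 : Nat)) : Int) := by push_cast; ring
    have hget : PySem.List.pyGetD labels ((c : Nat) : Int) "" = PySem.List.pyGetD (labels.drop c) 0 "" := by
      simp [PySem.List.pyGetD_natCast, PySem.List.pyGetD_zero, List.getD, List.getElem?_drop]
    have hdrop : (labels.drop c).drop 1 = labels.drop (c + 1) := by
      rw [List.drop_drop]
    rcases Nat.even_or_odd n with he | ho
    · have h2 : n % 2 = 0 := Nat.even_iff.mp he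
      have h2' : (n + 1) % 2 = 1 := by omega
      cases sf with
      | true =>
        have hstep : pvStepA labels adult true (((c : Nat) : Int), acc) (((n : Nat) : Int), hd)
            = (((c : Nat) : Int), acc ++ [pvSil hd]) := by
          simp only [pvStepA]; rw [hmod, h2]; simp [pvSil]
        rw [hstep, hcast, ih (n + 1) c]
        simp [pvWalk, h2, h2']
      | false =>
        have hstep : pvStepA labels adult false (((c : Nat) : Int), acc) (((n : Nat) : Int), hd)
            = ((((c + 1 : Nat)) : Int), acc ++ [pvSpk adult (PySem.List.pyGetD (labels.drop c) 0 "") hd]) := by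
          simp only [pvStepA, hmod, h2, hget, pvSpk]
          norm_num
        rw [hstep, hcast, ih (n + 1) (c + 1)]
        simp [pvWalk, h2, h2', hdrop]
    · have h2 : n % 2 = 1 := Nat.odd_iff.mp ho
      have h2' : (n + 1) % 2 = 0 := by omega
      cases sf with
      | true =>
        have hstep : pvStepA labels adult true (((c : Nat) : Int), acc) (((n : Nat) : Int), hd)
            = ((((c + 1 : Nat)) : Int), acc ++ [pvSpk adult (PySem.List.pyGetD (labels.drop c) 0 "") hd]) := by
          simp only [pvStepA, hmod, h2, hget, pvSpk]
          norm_num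
        rw [hstep, hcast, ih (n + 1) (c + 1)]
        simp [pvWalk, h2, h2', hdrop]
      | false =>
        have hstep : pvStepA labels adult false (((c : Nat) : Int), acc) (((n : Nat) : Int), hd)
            = (((c : Nat) : Int), acc ++ [pvSil hd]) := by
          simp only [pvStepA]; rw [hmod, h2]; simp [pvSil]
        rw [hstep, hcast, ih (n + 1) c]
        simp [pvWalk, h2, h2']

-- the B-side staged pipeline computes pvWalk, given enough labels for the speaker stream
lemma pvB_walk (adult : String) : ∀ (n : Nat) (segs : List (Int × Int)) (labs : List String),
    segs.length ≤ n →
    ((pvOdds segs).length ≤ labs.length →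
      pvRiffle ((pvEvens segs).map (fun p => ("2", p.1, p.2, "Silence")))
          ((labs.zip (pvOdds segs)).map (fun q =>
            (q.1, q.2.1, q.2.2, if q.1 == adult then "Adult" else "Child")))
        = pvWalk adult true labs segs)
    ∧ ((pvEvens segs).length ≤ labs.length →
      pvRiffle ((labs.zip (pvEvens segs)).map (fun q =>
            (q.1, q.2.1, q.2.2, if q.1 == adult then "Adult" else "Child")))
          ((pvOdds segs).map (fun p => ("2", p.1, p.2, "Silence")))
        = pvWalk adult false labs segs) := by
  intro n
  induction n with
  | zero =>
    intro segs labs hle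
    have : segs = [] := List.eq_nil_of_length_eq_zero (Nat.le_zero.mp hle)
    subst this
    simp [pvEvens, pvOdds, pvWalk, pvRiffle]
  | succ m ih =>
    intro segs labs hle
    match segs with
    | [] => simp [pvEvens, pvOdds, pvWalk, pvRiffle]
    | [s0] =>
      constructor
      · intro _
        simp [pvEvens, pvOdds, pvWalk, pvSil, pvRiffle]
      · intro hlab
        have hne : labs ≠ [] := by
          intro h; subst h; simp [pvEvens] at hlab
        obtain ⟨l, ls, rfl⟩ := List.exists_cons_of_ne_nil hne
        simp [pvEvens, pvOdds, pvWalk, pvSpk, pvRiffle, PySem.List.pyGetD_zero_cons]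
    | s0 :: s1 :: t =>
      have hlen : t.length ≤ m := by simp at hle; omega
      have hev : pvEvens (s0 :: s1 :: t) = s0 :: pvEvens t := rfl
      have hod : pvOdds (s0 :: s1 :: t) = s1 :: pvOdds t := by
        show pvEvens (s1 :: t) = s1 :: pvOdds t
        exact pvEvens_cons s1 t
      constructor
      · intro hlab
        rw [hod] at hlab
        have hne : labs ≠ [] := by
          intro h; subst h; simp at hlab
        obtain ⟨l, ls, rfl⟩ := List.exists_cons_of_ne_nil hne
        have hlab' : (pvOdds t).length ≤ ls.length := by
          simp at hlab; omega
        rw [hev, hod]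
        simp only [List.zip_cons_cons, List.map_cons, pvRiffle]
        rw [(ih t ls hlen).1 hlab']
        simp [pvWalk, pvSil, pvSpk, PySem.List.pyGetD_zero_cons]
      · intro hlab
        rw [hev] at hlab
        have hne : labs ≠ [] := by
          intro h; subst h; simp at hlab
        obtain ⟨l, ls, rfl⟩ := List.exists_cons_of_ne_nil hne
        have hlab' : (pvEvens t).length ≤ ls.length := by
          simp at hlab; omega
        rw [hev, hod]
        simp only [List.zip_cons_cons, List.map_cons, pvRiffle]
        rw [(ih t ls hlen).2 hlab']
        simp [pvWalk, pvSil, pvSpk, PySem.List.pyGetD_zero_cons]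

-- ===== VERDICT (by name: the statement is the Claim_ definition above) =====
theorem create_labellings_with_pydub_spec : Claim_equal_create_labellings_with_pydub := by
  intro y segments labels silence_first _ hpre
  unfold Spec_create_labellings_with_pydub
  obtain ⟨hne, hlen⟩ := hpre
  show create_labellings_with_pydub y segments labels silence_first
      = create_labellings_with_pydub_alt y segments labels silence_first
  simp only [create_labellings_with_pydub, create_labellings_with_pydub_alt]
  set adult := PySem.List.pyGetD labels 0 "" with hadult
  -- A side
  have hA := pvA_loop labels adult silence_first segments 0 0 []
  simp only [Nat.cast_zero, List.drop_zero, List.nil_append] at hA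
  rw [hA]
  -- B side
  have hsplit := (pvSplit_fold segments [] []).1
  simp only [List.nil_append] at hsplit
  have hB := pvB_walk adult segments.length segments labels (le_refl _)
  have hlens := pvLen_evens_odds (α := Int × Int) segments
  cases silence_first with
  | true =>
    have hlab : (pvOdds segments).length ≤ labels.length := by
      rw [hlens.2]; simpa using hlen
    rw [pvSplitAlternating, hsplit]
    simp only [if_true]
    rw [show (decide True) = true from by decide, hB.1 hlab]
  | false =>
    have hlab : (pvEvens segments).length ≤ labels.length := by
      rw [hlens.1]; simpa using hlen
    rw [pvSplitAlternating, hsplit]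
    simp only [Bool.false_eq_true, if_false]
    rw [show (decide ((0 : Nat) % 2 = 1)) = false from by decide, hB.2 hlab]
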